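-- pv_equiv track=rewrite | github.com/Trialer89-byte/HSE_Agent | backend/app/agents/base_agent.py | detect_knowledge_gaps
-- ===== SOURCE A (Python) =====
-- from typing import Dict, Any, List, Optional
--
-- def detect_knowledge_gaps(
--
--     permit_data: Dict[str, Any],
--     context_documents: List[Dict[str, Any]]
-- ) -> Dict[str, List[str]]:
--     """
--     Detect potential knowledge gaps based on permit data and available documents
--     """
--     gaps = {
--         "missing_regulations": [],
--         "missing_procedures": [],
--         "incomplete_coverage": []
--     }
--
--     work_type = permit_data.get("work_type", "").lower()
--     description = permit_data.get("description", "").lower()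
--     location = permit_data.get("location", "").lower()
--
--     # Check for work-type specific gaps
--     work_type_mappings = {
--         "chimico": ["d.lgs", "reach", "clp", "adr", "sostanze", "chimiche"],
--         "scavo": ["scavi", "consolidamento", "servizi interrati", "dpr 177"],
--         "elettrico": ["cei", "elettrotecnica", "impianti elettrici", "bassa tensione"],
--         "meccanico": ["macchine", "attrezzature", "manutenzione", "lockout"],
--         "edile": ["cantiere", "ponteggi", "dpi anticaduta", "edilizia"],
--         "spazi_confinati": ["spazi confinati", "atmosfere", "gas", "ventilazione"]
--     }
--
--     # Look for keywords that might indicate need for specific documents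
--     risk_keywords = {
--         "altezza": ["dpi anticaduta", "ponteggi", "lavori in quota"],
--         "gas": ["rilevatori gas", "ventilazione", "atmosfere esplosive"],
--         "sostanze": ["schede sicurezza", "dpi chimici", "stoccaggio"],
--         "energia": ["lockout", "tagout", "isolamento energetico"],
--         "macchine": ["manutenzione", "sicurezza macchine", "protezioni"]
--     }
--
--     # Analyze available document types
--     available_doc_types = set()
--     available_categories = set()
--
--     for doc in context_documents:
--         available_doc_types.add(doc.get("document_type", ""))
--         available_categories.add(doc.get("category", ""))
--
--     # Check for missing regulations based on work type
--     if work_type in work_type_mappings: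
--         expected_keywords = work_type_mappings[work_type]
--         for keyword in expected_keywords:
--             if not any(keyword in doc.get("content", "").lower() for doc in context_documents):
--                 gaps["missing_regulations"].append(keyword)
--
--     # Check for missing procedures based on risk keywords
--     for risk, procedures in risk_keywords.items():
--         if risk in description or risk in location:
--             for procedure in procedures:
--                 if not any(procedure in doc.get("content", "").lower() for doc in context_documents):
--                     gaps["missing_procedures"].append(procedure)
--
--     # Check for incomplete coverage
--     if "normativa" not in available_doc_types:
--         gaps["incomplete_coverage"].append("normative documents")
--
--     if "istruzione_operativa" not in available_doc_types:
--         gaps["incomplete_coverage"].append("operational procedures")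
--
--     return gaps
-- ===== SOURCE B (Python) =====
-- WORK_TYPE_MAPPINGS = {
--     "chimico": ["d.lgs", "reach", "clp", "adr", "sostanze", "chimiche"],
--     "scavo": ["scavi", "consolidamento", "servizi interrati", "dpr 177"],
--     "elettrico": ["cei", "elettrotecnica", "impianti elettrici", "bassa tensione"],
--     "meccanico": ["macchine", "attrezzature", "manutenzione", "lockout"],
--     "edile": ["cantiere", "ponteggi", "dpi anticaduta", "edilizia"],
--     "spazi_confinati": ["spazi confinati", "atmosfere", "gas", "ventilazione"],
-- }
--
-- RISK_KEYWORDS = {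
--     "altezza": ["dpi anticaduta", "ponteggi", "lavori in quota"],
--     "gas": ["rilevatori gas", "ventilazione", "atmosfere esplosive"],
--     "sostanze": ["schede sicurezza", "dpi chimici", "stoccaggio"],
--     "energia": ["lockout", "tagout", "isolamento energetico"],
--     "macchine": ["manutenzione", "sicurezza macchine", "protezioni"],
-- }
--
--
-- def detect_knowledge_gaps(permit_data, context_documents):
--     # Worklist algorithm: decide which keywords are needed FIRST, then make a
--     # single pass over the documents, lowering each content once and crossing
--     # every keyword found in it off the worklists; survivors are the gaps.
--     work_type = permit_data.get("work_type", "").lower()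
--     description = permit_data.get("description", "").lower()
--     location = permit_data.get("location", "").lower()
--
--     pending_regulations = list(WORK_TYPE_MAPPINGS.get(work_type, []))
--     pending_procedures = [
--         procedure
--         for risk, procedures in RISK_KEYWORDS.items()
--         if risk in description or risk in location
--         for procedure in procedures
--     ]
--
--     seen_types = set()
--     for doc in context_documents:
--         content = doc.get("content", "").lower()
--         pending_regulations = [k for k in pending_regulations if k not in content]
--         pending_procedures = [p for p in pending_procedures if p not in content]
--         seen_types.add(doc.get("document_type", ""))
--
--     incomplete_coverage = []
--     if "normativa" not in seen_types:
--         incomplete_coverage.append("normative documents")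
--     if "istruzione_operativa" not in seen_types:
--         incomplete_coverage.append("operational procedures")
--
--     return {
--         "missing_regulations": pending_regulations,
--         "missing_procedures": pending_procedures,
--         "incomplete_coverage": incomplete_coverage,
--     }
-- ===== Notes on version B (the rewrite author's own statement) =====
-- stated objective: alternative
-- what changed: B inverts the loop nesting: it builds the needed-keyword worklists up front, then makes a single pass over the documents, lowercasing each content once and crossing off every keyword found in it; A instead rescans (and re-lowercases) the whole document list for every keyword.
import Mathlib
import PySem

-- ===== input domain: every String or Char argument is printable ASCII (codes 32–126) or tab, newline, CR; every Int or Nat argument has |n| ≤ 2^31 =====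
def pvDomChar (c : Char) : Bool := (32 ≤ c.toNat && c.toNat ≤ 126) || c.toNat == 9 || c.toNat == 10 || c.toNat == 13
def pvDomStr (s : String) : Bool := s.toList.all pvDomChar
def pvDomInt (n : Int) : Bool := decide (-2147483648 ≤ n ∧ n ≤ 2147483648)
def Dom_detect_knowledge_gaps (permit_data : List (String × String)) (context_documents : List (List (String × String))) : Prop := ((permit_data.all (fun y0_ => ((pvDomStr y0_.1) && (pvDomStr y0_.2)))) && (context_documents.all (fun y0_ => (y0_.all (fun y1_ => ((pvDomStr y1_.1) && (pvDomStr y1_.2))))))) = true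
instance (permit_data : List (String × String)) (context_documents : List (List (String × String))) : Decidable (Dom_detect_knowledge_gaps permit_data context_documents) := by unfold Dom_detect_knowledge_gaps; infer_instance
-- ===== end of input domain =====

-- B inverts A's loop nesting: it builds the needed-keyword worklists first, then makes one pass
-- over the documents, lowering each content once and crossing off every keyword found there;
-- the survivors are the gaps (alternative decomposition, same return value).

-- ===== PORT A =====
-- Port of A: builds the gaps dict and mutates it in place (append = Dict.modify),
-- rescanning and re-lowering every document's content for every keyword.
def detect_knowledge_gaps (permit_data : List (String × String)) (context_documents : List (List (String × String))) : List (String × List String) :=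
  let gaps : PySem.Dict String (List String) :=
    PySem.Dict.ofList [("missing_regulations", []), ("missing_procedures", []), ("incomplete_coverage", [])]
  let work_type := PySem.Str.lower (PySem.Dict.getD ⟨permit_data⟩ "work_type" "")
  let description := PySem.Str.lower (PySem.Dict.getD ⟨permit_data⟩ "description" "")
  let location := PySem.Str.lower (PySem.Dict.getD ⟨permit_data⟩ "location" "")
  let work_type_mappings : PySem.Dict String (List String) := PySem.Dict.ofList
    [("chimico", ["d.lgs", "reach", "clp", "adr", "sostanze", "chimiche"]),
     ("scavo", ["scavi", "consolidamento", "servizi interrati", "dpr 177"]),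
     ("elettrico", ["cei", "elettrotecnica", "impianti elettrici", "bassa tensione"]),
     ("meccanico", ["macchine", "attrezzature", "manutenzione", "lockout"]),
     ("edile", ["cantiere", "ponteggi", "dpi anticaduta", "edilizia"]),
     ("spazi_confinati", ["spazi confinati", "atmosfere", "gas", "ventilazione"])]
  let risk_keywords : PySem.Dict String (List String) := PySem.Dict.ofList
    [("altezza", ["dpi anticaduta", "ponteggi", "lavori in quota"]),
     ("gas", ["rilevatori gas", "ventilazione", "atmosfere esplosive"]),
     ("sostanze", ["schede sicurezza", "dpi chimici", "stoccaggio"]),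
     ("energia", ["lockout", "tagout", "isolamento energetico"]),
     ("macchine", ["manutenzione", "sicurezza macchine", "protezioni"])]
  -- for doc in context_documents: add document_type / category to the two sets
  let sets := context_documents.foldl
    (fun (s : PySem.Set String × PySem.Set String) doc =>
      (s.1.add (PySem.Dict.getD ⟨doc⟩ "document_type" ""),
       s.2.add (PySem.Dict.getD ⟨doc⟩ "category" "")))
    (PySem.Set.empty, PySem.Set.empty)
  let available_doc_types := sets.1
  let gaps :=
    if work_type_mappings.contains work_type then
      let expected_keywords := (work_type_mappings.get? work_type).getD []
      expected_keywords.foldl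
        (fun g keyword =>
          if !(context_documents.any (fun doc =>
                PySem.Str.isIn keyword (PySem.Str.lower (PySem.Dict.getD ⟨doc⟩ "content" "")))) then
            g.modify "missing_regulations" [] (fun l => l ++ [keyword])
          else g)
        gaps
    else gaps
  let gaps := risk_keywords.items.foldl
    (fun g rp =>
      if PySem.Str.isIn rp.1 description || PySem.Str.isIn rp.1 location then
        rp.2.foldl
          (fun g procedure =>
            if !(context_documents.any (fun doc =>
                  PySem.Str.isIn procedure (PySem.Str.lower (PySem.Dict.getD ⟨doc⟩ "content" "")))) then
              g.modify "missing_procedures" [] (fun l => l ++ [procedure])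
            else g)
          g
      else g)
    gaps
  let gaps :=
    if !(available_doc_types.contains "normativa") then
      gaps.modify "incomplete_coverage" [] (fun l => l ++ ["normative documents"])
    else gaps
  let gaps :=
    if !(available_doc_types.contains "istruzione_operativa") then
      gaps.modify "incomplete_coverage" [] (fun l => l ++ ["operational procedures"])
    else gaps
  gaps.items

-- ===== PORT B =====
-- Port of B: worklists built first, then a single fold over the documents that
-- filters the two pending lists and accumulates the seen document types.
def pvAltWorkTypeMappings : PySem.Dict String (List String) := PySem.Dict.ofList
  [("chimico", ["d.lgs", "reach", "clp", "adr", "sostanze", "chimiche"]),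
   ("scavo", ["scavi", "consolidamento", "servizi interrati", "dpr 177"]),
   ("elettrico", ["cei", "elettrotecnica", "impianti elettrici", "bassa tensione"]),
   ("meccanico", ["macchine", "attrezzature", "manutenzione", "lockout"]),
   ("edile", ["cantiere", "ponteggi", "dpi anticaduta", "edilizia"]),
   ("spazi_confinati", ["spazi confinati", "atmosfere", "gas", "ventilazione"])]

def pvAltRiskKeywords : PySem.Dict String (List String) := PySem.Dict.ofList
  [("altezza", ["dpi anticaduta", "ponteggi", "lavori in quota"]),
   ("gas", ["rilevatori gas", "ventilazione", "atmosfere esplosive"]),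
   ("sostanze", ["schede sicurezza", "dpi chimici", "stoccaggio"]),
   ("energia", ["lockout", "tagout", "isolamento energetico"]),
   ("macchine", ["manutenzione", "sicurezza macchine", "protezioni"])]

def detect_knowledge_gaps_alt (permit_data : List (String × String)) (context_documents : List (List (String × String))) : List (String × List String) :=
  let work_type := PySem.Str.lower (PySem.Dict.getD ⟨permit_data⟩ "work_type" "")
  let description := PySem.Str.lower (PySem.Dict.getD ⟨permit_data⟩ "description" "")
  let location := PySem.Str.lower (PySem.Dict.getD ⟨permit_data⟩ "location" "")
  let pending_regulations := (pvAltWorkTypeMappings.get? work_type).getD []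
  let pending_procedures := pvAltRiskKeywords.items.flatMap (fun rp =>
    if PySem.Str.isIn rp.1 description || PySem.Str.isIn rp.1 location then rp.2 else [])
  -- one pass: filter both worklists against each content, collect document types
  let st := context_documents.foldl
    (fun (s : List String × List String × PySem.Set String) doc =>
      let content := PySem.Str.lower (PySem.Dict.getD ⟨doc⟩ "content" "")
      (s.1.filter (fun k => !(PySem.Str.isIn k content)),
       s.2.1.filter (fun p => !(PySem.Str.isIn p content)),
       s.2.2.add (PySem.Dict.getD ⟨doc⟩ "document_type" "")))
    (pending_regulations, pending_procedures, PySem.Set.empty)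
  let incomplete_coverage : List String := []
  let incomplete_coverage :=
    if !(st.2.2.contains "normativa") then incomplete_coverage ++ ["normative documents"]
    else incomplete_coverage
  let incomplete_coverage :=
    if !(st.2.2.contains "istruzione_operativa") then incomplete_coverage ++ ["operational procedures"]
    else incomplete_coverage
  [("missing_regulations", st.1),
   ("missing_procedures", st.2.1),
   ("incomplete_coverage", incomplete_coverage)]

-- ===== PRECONDITION & SPEC =====
def Spec_detect_knowledge_gaps (permit_data : List (String × String)) (context_documents : List (List (String × String))) (out : List (String × List String)) : Prop := out = detect_knowledge_gaps_alt permit_data context_documents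
instance (permit_data : List (String × String)) (context_documents : List (List (String × String))) (out : List (String × List String)) : Decidable (Spec_detect_knowledge_gaps permit_data context_documents out) := by unfold Spec_detect_knowledge_gaps; infer_instance

-- ===== CLAIM (what is proved, stated in full; the proofs are below) =====
def Claim_equal_detect_knowledge_gaps : Prop := ∀ (permit_data : List (String × String)) (context_documents : List (List (String × String))), Dom_detect_knowledge_gaps permit_data context_documents → Spec_detect_knowledge_gaps permit_data context_documents (detect_knowledge_gaps permit_data context_documents)

-- ===== LEMMAS AND PROOFS =====

-- A fold whose three state components are updated independently is three folds.
lemma pv_foldl_triple {α σ₁ σ₂ σ₃ : Type} (f : σ₁ → α → σ₁) (g : σ₂ → α → σ₂) (h : σ₃ → α → σ₃)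
    (l : List α) (a : σ₁) (b : σ₂) (c : σ₃) :
    l.foldl (fun s e => (f s.1 e, g s.2.1 e, h s.2.2 e)) (a, b, c)
      = (l.foldl f a, l.foldl g b, l.foldl h c) := by
  induction l generalizing a b c with
  | nil => rfl
  | cons x xs ih => simpa using ih (f a x) (g b x) (h c x)

-- Filtering a worklist against each document in turn equals one filter by "found in no document".
lemma pv_foldl_filter {α : Type} (c : α → String) (docs : List α) (L : List String) :
    docs.foldl (fun (l : List String) d => l.filter (fun k => !(PySem.Str.isIn k (c d)))) L
      = L.filter (fun k => !(docs.any (fun d => PySem.Str.isIn k (c d)))) := by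
  induction docs generalizing L with
  | nil => simp
  | cons d ds ih =>
      simp only [List.foldl_cons, ih, List.filter_filter, List.any_cons]
      congr 1; funext k
      cases PySem.Str.isIn k (c d) <;> simp

-- The three-slot gaps dict, by its fields.
def pvG (R P C : List String) : PySem.Dict String (List String) :=
  PySem.Dict.mk [("missing_regulations", R), ("missing_procedures", P), ("incomplete_coverage", C)]

lemma pvG_modify_mr (R P C : List String) (f : List String → List String) :
    (pvG R P C).modify "missing_regulations" [] f = pvG (f R) P C := by
  simp [pvG, PySem.Dict.modify, PySem.Dict.insert, PySem.Dict.getD, PySem.Dict.get?]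

lemma pvG_modify_mp (R P C : List String) (f : List String → List String) :
    (pvG R P C).modify "missing_procedures" [] f = pvG R (f P) C := by
  simp [pvG, PySem.Dict.modify, PySem.Dict.insert, PySem.Dict.getD, PySem.Dict.get?]

lemma pvG_modify_ic (R P C : List String) (f : List String → List String) :
    (pvG R P C).modify "incomplete_coverage" [] f = pvG R P (f C) := by
  simp [pvG, PySem.Dict.modify, PySem.Dict.insert, PySem.Dict.getD, PySem.Dict.get?]

-- A's conditional append-loop on the "missing_regulations" slot is a filter.
lemma pv_fold_mr (kws : List String) (c : String → Bool) (R P C : List String) :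
    kws.foldl (fun g kw => if c kw then g.modify "missing_regulations" [] (fun l => l ++ [kw]) else g) (pvG R P C)
      = pvG (R ++ kws.filter c) P C := by
  induction kws generalizing R with
  | nil => simp
  | cons kw kws ih =>
      by_cases h : c kw = true <;> simp [h, pvG_modify_mr, ih]

lemma pv_fold_mp (kws : List String) (c : String → Bool) (R P C : List String) :
    kws.foldl (fun g kw => if c kw then g.modify "missing_procedures" [] (fun l => l ++ [kw]) else g) (pvG R P C)
      = pvG R (P ++ kws.filter c) C := by
  induction kws generalizing P with
  | nil => simp
  | cons kw kws ih =>
      by_cases h : c kw = true <;> simp [h, pvG_modify_mp, ih]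

-- A's outer risk loop is a flatMap of filters.
lemma pv_fold_risk (rps : List (String × List String)) (cnd : String × List String → Bool) (c : String → Bool) (R P C : List String) :
    rps.foldl (fun g rp =>
        if cnd rp then
          rp.2.foldl (fun g p => if c p then g.modify "missing_procedures" [] (fun l => l ++ [p]) else g) g
        else g) (pvG R P C)
      = pvG R (P ++ rps.flatMap (fun rp => if cnd rp then rp.2.filter c else [])) C := by
  induction rps generalizing P with
  | nil => simp
  | cons rp rps ih =>
      by_cases h : cnd rp = true <;> simp [h, pv_fold_mp, ih]

-- ===== VERDICT (by name: the statement is the Claim_ definition above) =====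
set_option maxHeartbeats 1600000 in
theorem detect_knowledge_gaps_spec : Claim_equal_detect_knowledge_gaps := by
  intro pd cds _
  unfold Spec_detect_knowledge_gaps detect_knowledge_gaps detect_knowledge_gaps_alt
  dsimp only
  rw [pv_foldl_triple
    (f := fun (l : List String) doc => l.filter (fun k => !(PySem.Str.isIn k (PySem.Str.lower (PySem.Dict.getD ⟨doc⟩ "content" "")))))
    (g := fun (l : List String) doc => l.filter (fun p => !(PySem.Str.isIn p (PySem.Str.lower (PySem.Dict.getD ⟨doc⟩ "content" "")))))
    (h := fun (s : PySem.Set String) doc => s.add (PySem.Dict.getD ⟨doc⟩ "document_type" ""))]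
  rw [pv_foldl_filter (fun doc => PySem.Str.lower (PySem.Dict.getD ⟨doc⟩ "content" "")) cds]
  rw [pv_foldl_filter (fun doc => PySem.Str.lower (PySem.Dict.getD ⟨doc⟩ "content" "")) cds]
  rw [PySem.List.foldl_prod_mk
    (f := fun (t : PySem.Set String) doc => t.add (PySem.Dict.getD ⟨doc⟩ "document_type" ""))
    (g := fun (c : PySem.Set String) doc => c.add (PySem.Dict.getD ⟨doc⟩ "category" ""))]
  rw [show (PySem.Dict.ofList [("missing_regulations", ([] : List String)), ("missing_procedures", []), ("incomplete_coverage", [])]) = pvG [] [] [] from by decide]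
  rw [show (PySem.Dict.ofList
      [("chimico", ["d.lgs", "reach", "clp", "adr", "sostanze", "chimiche"]),
       ("scavo", ["scavi", "consolidamento", "servizi interrati", "dpr 177"]),
       ("elettrico", ["cei", "elettrotecnica", "impianti elettrici", "bassa tensione"]),
       ("meccanico", ["macchine", "attrezzature", "manutenzione", "lockout"]),
       ("edile", ["cantiere", "ponteggi", "dpi anticaduta", "edilizia"]),
       ("spazi_confinati", ["spazi confinati", "atmosfere", "gas", "ventilazione"])]) = pvAltWorkTypeMappings from rfl]
  rw [show (PySem.Dict.ofList
      [("altezza", ["dpi anticaduta", "ponteggi", "lavori in quota"]),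
       ("gas", ["rilevatori gas", "ventilazione", "atmosfere esplosive"]),
       ("sostanze", ["schede sicurezza", "dpi chimici", "stoccaggio"]),
       ("energia", ["lockout", "tagout", "isolamento energetico"]),
       ("macchine", ["manutenzione", "sicurezza macchine", "protezioni"])]) = pvAltRiskKeywords from rfl]
  have hproc : (pvAltRiskKeywords.items.flatMap
      (fun rp => if (PySem.Str.isIn rp.1 (PySem.Str.lower (PySem.Dict.getD ⟨pd⟩ "description" "")) ||
            PySem.Str.isIn rp.1 (PySem.Str.lower (PySem.Dict.getD ⟨pd⟩ "location" ""))) = true then rp.2 else [])).filter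
        (fun p => !(cds.any (fun doc => PySem.Str.isIn p (PySem.Str.lower (PySem.Dict.getD ⟨doc⟩ "content" "")))))
      = pvAltRiskKeywords.items.flatMap
      (fun rp => if (PySem.Str.isIn rp.1 (PySem.Str.lower (PySem.Dict.getD ⟨pd⟩ "description" "")) ||
            PySem.Str.isIn rp.1 (PySem.Str.lower (PySem.Dict.getD ⟨pd⟩ "location" ""))) = true then
          rp.2.filter (fun p => !(cds.any (fun doc => PySem.Str.isIn p (PySem.Str.lower (PySem.Dict.getD ⟨doc⟩ "content" ""))))) else []) := by
    rw [List.filter_flatMap]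
    apply List.flatMap_congr
    intro rp _
    split_ifs <;> simp
  rcases Bool.eq_false_or_eq_true (pvAltWorkTypeMappings.contains (PySem.Str.lower (PySem.Dict.getD ⟨pd⟩ "work_type" ""))) with hc | hc
  · -- work type found in the table
    simp only [hc, if_true, pv_fold_mr, pv_fold_risk, List.nil_append, hproc]
    rcases Bool.eq_false_or_eq_true ((cds.foldl (fun (s : PySem.Set String) doc => s.add (PySem.Dict.getD ⟨doc⟩ "document_type" "")) PySem.Set.empty).contains "normativa") with hb1 | hb1 <;>
    rcases Bool.eq_false_or_eq_true ((cds.foldl (fun (s : PySem.Set String) doc => s.add (PySem.Dict.getD ⟨doc⟩ "document_type" "")) PySem.Set.empty).contains "istruzione_operativa") with hb2 | hb2 <;>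
      simp only [hb1, hb2, Bool.not_true, Bool.not_false, Bool.false_eq_true,
        if_true, if_false, pvG_modify_ic, pvG, List.nil_append, List.append_nil] <;> rfl
  · -- work type not in the table: both sides have no missing_regulations
    rw [show ((pvAltWorkTypeMappings.get? (PySem.Str.lower (PySem.Dict.getD ⟨pd⟩ "work_type" ""))).getD ([] : List String))
        = pvAltWorkTypeMappings.getD (PySem.Str.lower (PySem.Dict.getD ⟨pd⟩ "work_type" "")) [] from rfl,
       PySem.Dict.getD_of_not_contains pvAltWorkTypeMappings ([] : List String) hc]
    simp only [hc, Bool.false_eq_true, if_false, pv_fold_risk, List.nil_append, hproc, List.filter_nil]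
    rcases Bool.eq_false_or_eq_true ((cds.foldl (fun (s : PySem.Set String) doc => s.add (PySem.Dict.getD ⟨doc⟩ "document_type" "")) PySem.Set.empty).contains "normativa") with hb1 | hb1 <;>
    rcases Bool.eq_false_or_eq_true ((cds.foldl (fun (s : PySem.Set String) doc => s.add (PySem.Dict.getD ⟨doc⟩ "document_type" "")) PySem.Set.empty).contains "istruzione_operativa") with hb2 | hb2 <;>
      simp only [hb1, hb2, Bool.not_true, Bool.not_false, Bool.false_eq_true,
        if_true, if_false, pvG_modify_ic, pvG, List.nil_append, List.append_nil] <;> rfl
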